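-- pv_equiv track=rewrite | github.com/jimmy3018/manipuri_news_summarization | summarizer_manipuri.py | split_role_map
-- ===== SOURCE A (Python) =====
-- from collections import defaultdict
-- from typing import Any, Dict, List, Optional, Tuple, Set
--
-- def safe_text(x: Any) -> str:
--     if x is None:
--         return ""
--     return str(x).strip()
--
-- def unique_preserve_order(items: List[str]) -> List[str]:
--     seen = set()
--     out = []
--     for item in items:
--         item = safe_text(item)
--         if item and item not in seen:
--             seen.add(item)
--             out.append(item)
--     return out
--
-- def split_role_map(arguments: List[Dict[str, Any]]) -> Dict[str, List[str]]:
--     role_map: Dict[str, List[str]] = defaultdict(list)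
--     for arg in arguments:
--         role = safe_text(arg.get("role", "ARG")).upper()
--         val = safe_text(arg.get("text"))
--         if val:
--             role_map[role].append(val)
--     return {k: unique_preserve_order(v) for k, v in role_map.items()}
-- ===== SOURCE B (Python) =====
-- from typing import Any, Dict, List
--
--
-- def safe_text(x: Any) -> str:
--     if x is None:
--         return ""
--     return str(x).strip()
--
--
-- def split_role_map(arguments: List[Dict[str, Any]]) -> Dict[str, List[str]]:
--     out: Dict[str, List[str]] = {}
--     seen: Dict[str, set] = {}
--     for arg in arguments:
--         role = safe_text(arg.get("role", "ARG")).upper()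
--         val = safe_text(arg.get("text"))
--         if val and val not in seen.setdefault(role, set()):
--             seen[role].add(val)
--             out.setdefault(role, []).append(val)
--     return out
-- ===== Notes on version B (the rewrite author's own statement) =====
-- stated objective: alternative
-- what changed: B fuses A's two phases (defaultdict grouping pass followed by a per-role unique_preserve_order dedup pass) into one traversal that maintains the result dict and a parallel per-role seen-set, deduplicating on insertion.
import Mathlib
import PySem

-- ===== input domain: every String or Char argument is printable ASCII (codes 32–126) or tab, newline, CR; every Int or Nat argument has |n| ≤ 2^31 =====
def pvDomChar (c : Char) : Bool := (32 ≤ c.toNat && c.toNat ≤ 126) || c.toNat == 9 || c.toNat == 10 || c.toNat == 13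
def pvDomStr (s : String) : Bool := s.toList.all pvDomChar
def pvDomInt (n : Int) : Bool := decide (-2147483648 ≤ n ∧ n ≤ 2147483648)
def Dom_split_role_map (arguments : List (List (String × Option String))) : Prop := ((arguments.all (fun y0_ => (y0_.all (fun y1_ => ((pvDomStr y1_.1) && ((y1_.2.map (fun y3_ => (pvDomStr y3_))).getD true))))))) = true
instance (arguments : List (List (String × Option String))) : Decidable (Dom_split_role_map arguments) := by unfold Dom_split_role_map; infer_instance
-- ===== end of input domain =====

-- B fuses A's defaultdict-grouping pass and A's per-role dedup second pass into one traversal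
-- maintaining the result dict and a per-role seen-set together (objective: alternative; same cost).


-- ===== PORT A =====
-- safe_text applied to a value a dict lookup can produce (None → "", str → str.strip())
def pvSafeText : Option String → String
  | none => ""
  | some s => PySem.Str.strip s

-- arg.get(k, dflt) on the association-list dict arg
def pvArgGet (arg : List (String × Option String)) (k : String) (dflt : Option String) : Option String :=
  ((PySem.Dict.mk arg).get? k).getD dflt

def unique_preserve_order (items : List String) : List String :=
  (items.foldl
    (fun (st : PySem.Set String × List String) item0 =>
      let item := PySem.Str.strip item0
      if item ≠ "" ∧ ¬ (st.1.contains item) then (PySem.Set.add st.1 item, st.2 ++ [item]) else st)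
    (PySem.Set.empty, [])).2

-- loop body of A's grouping pass (role_map[role].append(val) on the defaultdict)
def pvStepA (d : PySem.Dict String (List String)) (arg : List (String × Option String)) :
    PySem.Dict String (List String) :=
  let role := PySem.Str.upper (pvSafeText (pvArgGet arg "role" (some "ARG")))
  let val := pvSafeText (pvArgGet arg "text" none)
  if val ≠ "" then d.modify role [] (· ++ [val]) else d

def split_role_map (arguments : List (List (String × Option String))) : List (String × List String) :=
  let role_map := arguments.foldl pvStepA PySem.Dict.empty
  role_map.items.map (fun p => (p.1, unique_preserve_order p.2))

-- ===== PORT B =====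
-- loop body of B's single fused pass over (out, seen)
def pvStepB (st : PySem.Dict String (List String) × PySem.Dict String (PySem.Set String))
    (arg : List (String × Option String)) :
    PySem.Dict String (List String) × PySem.Dict String (PySem.Set String) :=
  let out := st.1
  let seen := st.2
  let role := PySem.Str.upper (pvSafeText (pvArgGet arg "role" (some "ARG")))
  let val := pvSafeText (pvArgGet arg "text" none)
  if val ≠ "" then
    let seen1 := seen.setdefault role PySem.Set.empty
    if (seen1.getD role PySem.Set.empty).contains val then (out, seen1)
    else (out.modify role [] (· ++ [val]),
          seen1.insert role (PySem.Set.add (seen1.getD role PySem.Set.empty) val))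
  else st

def split_role_map_alt (arguments : List (List (String × Option String))) : List (String × List String) :=
  (arguments.foldl pvStepB (PySem.Dict.empty, PySem.Dict.empty)).1.items

-- ===== PRECONDITION & SPEC =====
def Spec_split_role_map (arguments : List (List (String × Option String))) (out : List (String × List String)) : Prop := out = split_role_map_alt arguments
instance (arguments : List (List (String × Option String))) (out : List (String × List String)) : Decidable (Spec_split_role_map arguments out) := by unfold Spec_split_role_map; infer_instance

-- ===== CLAIM (what is proved, stated in full; the proofs are below) =====
def Claim_equal_split_role_map : Prop := ∀ (arguments : List (List (String × Option String))), Dom_split_role_map arguments → Spec_split_role_map arguments (split_role_map arguments)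

-- ===== LEMMAS AND PROOFS =====

theorem pv_dw_idem (p : Char → Bool) (l : List Char) :
    (l.dropWhile p).dropWhile p = l.dropWhile p := by
  induction l with
  | nil => simp
  | cons x t ih =>
    by_cases h : p x
    · simpa [h] using ih
    · simp [List.dropWhile_cons, h]

-- a prefix of a dropWhile-fixed list is dropWhile-fixed
theorem pv_dw_prefix (p : Char → Bool) (l : List Char) (hl : l.dropWhile p = l)
    (v : List Char) (hv : v <+: l) : v.dropWhile p = v := by
  cases v with
  | nil => simp
  | cons x t =>
    obtain ⟨r, hr⟩ := hv
    cases l with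
    | nil => simp at hr
    | cons y s =>
      have hx : x = y := by
        have := congrArg (List.head? ·) hr
        simpa using this
      subst hx
      cases hpx : p x with
      | false => simp [hpx]
      | true =>
        exfalso
        rw [List.dropWhile_cons_of_pos hpx] at hl
        have h1 := List.length_dropWhile_le p s
        have h2 := congrArg List.length hl
        simp at h2
        omega

theorem pv_chars_strip_idem (cs : List Char) :
    PySem.Chars.strip (PySem.Chars.strip cs) = PySem.Chars.strip cs := by
  simp only [PySem.Chars.strip, PySem.Chars.lstrip, PySem.Chars.rstrip]
  set p := PySem.Chars.isspace with hp
  set u := cs.dropWhile p with hu_def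
  have hu : u.dropWhile p = u := by rw [hu_def]; exact pv_dw_idem p cs
  set w := (List.dropWhile p u.reverse).reverse with hw_def
  have hwpre : w <+: u := by
    obtain ⟨t, ht⟩ := List.dropWhile_suffix (l := u.reverse) p
    refine ⟨t.reverse, ?_⟩
    rw [hw_def, ← List.reverse_append, ht, List.reverse_reverse]
  have hlw : w.dropWhile p = w := pv_dw_prefix p u hu w hwpre
  rw [hlw, hw_def, List.reverse_reverse, pv_dw_idem]

theorem pv_strip_strip (s : String) :
    PySem.Str.strip (PySem.Str.strip s) = PySem.Str.strip s := by
  simp only [PySem.Str.strip]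
  rw [show (String.ofList (PySem.Chars.strip s.toList)).toList = PySem.Chars.strip s.toList by simp]
  rw [pv_chars_strip_idem]

theorem pv_safeText_fix (x : Option String) :
    PySem.Str.strip (pvSafeText x) = pvSafeText x := by
  cases x with
  | none => rfl
  | some s => exact pv_strip_strip s

theorem pv_unique_aux (v : List String) (s : PySem.Set String)
    (h : ∀ x ∈ v, x ≠ "" ∧ PySem.Str.strip x = x) :
    v.foldl
      (fun (st : PySem.Set String × List String) item0 =>
        let item := PySem.Str.strip item0
        if item ≠ "" ∧ ¬ (st.1.contains item) then (PySem.Set.add st.1 item, st.2 ++ [item]) else st)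
      (s, s)
    = (v.foldl PySem.Set.add s, v.foldl PySem.Set.add s) := by
  induction v generalizing s with
  | nil => rfl
  | cons x t ih =>
    obtain ⟨hx1, hx2⟩ := h x (by simp)
    simp only [List.foldl_cons, hx2]
    have hstep :
        (if x ≠ "" ∧ ¬ ((s : PySem.Set String).contains x) then (PySem.Set.add s x, s ++ [x]) else (s, s))
          = (PySem.Set.add s x, PySem.Set.add s x) := by
      by_cases hc : x ∈ s
      · have hcb : PySem.Set.contains s x = true := by simpa using hc
        rw [if_neg (by simp [hc])]
        simp [PySem.Set.add, hc]
      · have hcb : PySem.Set.contains s x = false := by simpa using hc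
        rw [if_pos ⟨hx1, by simpa using hc⟩]
        simp [PySem.Set.add, hc]
    rw [hstep]
    exact ih _ (fun y hy => h y (by simp [hy]))

theorem pv_unique_eq_ofList (v : List String)
    (h : ∀ x ∈ v, x ≠ "" ∧ PySem.Str.strip x = x) :
    unique_preserve_order v = PySem.Set.ofList v := by
  unfold unique_preserve_order
  rw [show ((PySem.Set.empty : PySem.Set String), ([] : List String))
        = ((PySem.Set.empty : PySem.Set String), (PySem.Set.empty : PySem.Set String)) from rfl]
  rw [pv_unique_aux v PySem.Set.empty h]
  rw [PySem.Set.ofList_eq_foldl]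
  rfl

-- the invariant tying A's grouping dict to B's (out, seen) pair
def pvInv (d : PySem.Dict String (List String))
    (out : PySem.Dict String (List String)) (seen : PySem.Dict String (PySem.Set String)) : Prop :=
  d.keys.Nodup ∧
  out.items = d.items.map (fun p => (p.1, (PySem.Set.ofList p.2 : List String))) ∧
  seen.items = d.items.map (fun p => (p.1, PySem.Set.ofList p.2)) ∧
  (∀ p ∈ d.items, ∀ x ∈ p.2, x ≠ "" ∧ PySem.Str.strip x = x)

theorem pv_inv_step (d : PySem.Dict String (List String))
    (out : PySem.Dict String (List String)) (seen : PySem.Dict String (PySem.Set String))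
    (arg : List (String × Option String)) (h : pvInv d out seen) :
    pvInv (pvStepA d arg) (pvStepB (out, seen) arg).1 (pvStepB (out, seen) arg).2 := by
  obtain ⟨hnd, hout, hseen, hvals⟩ := h
  have hk : out.keys = d.keys := by
    show out.items.map (·.1) = d.items.map (·.1)
    rw [hout, List.map_map]; rfl
  have hks : seen.keys = d.keys := by
    show seen.items.map (·.1) = d.items.map (·.1)
    rw [hseen, List.map_map]; rfl
  have hco : ∀ k, out.contains k = d.contains k := by
    intro k
    rw [PySem.Dict.contains_eq_decide_mem_keys, PySem.Dict.contains_eq_decide_mem_keys, hk]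
  have hcs : ∀ k, seen.contains k = d.contains k := by
    intro k
    rw [PySem.Dict.contains_eq_decide_mem_keys, PySem.Dict.contains_eq_decide_mem_keys, hks]
  unfold pvStepA pvStepB
  simp only []
  set R := PySem.Str.upper (pvSafeText (pvArgGet arg "role" (some "ARG"))) with hR
  set V := pvSafeText (pvArgGet arg "text" none) with hV
  by_cases hVe : V = ""
  · rw [if_neg (by simp [hVe]), if_neg (by simp [hVe])]
    exact ⟨hnd, hout, hseen, hvals⟩
  · rw [if_pos hVe, if_pos hVe]
    have hVfix : PySem.Str.strip V = V := pv_safeText_fix _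
    have hmod : d.modify R [] (· ++ [V]) = d.insert R (d.getD R [] ++ [V]) := rfl
    by_cases hc : d.contains R = true
    · -- role already grouped
      obtain ⟨v, hv⟩ : ∃ v, d.get? R = some v := by
        rw [PySem.Dict.contains_eq_isSome_get?] at hc
        exact Option.isSome_iff_exists.mp hc
      have hdg : d.getD R [] = v := PySem.Dict.getD_of_get?_eq_some _ _ hv
      have hmem : (R, v) ∈ d.items := PySem.Dict.mem_items_of_get?_eq_some _ hv
      have hndo : out.keys.Nodup := by rw [hk]; exact hnd
      have hnds : seen.keys.Nodup := by rw [hks]; exact hnd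
      have hOm : (R, (PySem.Set.ofList v : List String)) ∈ out.items := by
        rw [hout]; exact List.mem_map_of_mem hmem
      have hSm : (R, PySem.Set.ofList v) ∈ seen.items := by
        rw [hseen]; exact List.mem_map_of_mem hmem
      have hOg : out.getD R [] = PySem.Set.ofList v := PySem.Dict.getD_of_mem_items _ hOm hndo _
      have hSg : seen.getD R PySem.Set.empty = PySem.Set.ofList v :=
        PySem.Dict.getD_of_mem_items _ hSm hnds _
      have hsd : seen.setdefault R PySem.Set.empty = seen :=
        PySem.Dict.setdefault_of_contains _ _ ((hcs R).trans hc)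
      rw [hsd, hSg]
      have hentry : ∀ p ∈ d.items, p.1 = R → p = (R, v) := by
        intro p hp hpR
        have := PySem.Dict.getD_of_mem_items d (k := p.1) (v := p.2)
          (by exact hp) hnd ([])
        rw [hpR, hdg] at this
        obtain ⟨p1, p2⟩ := p
        simp only at hpR this
        rw [hpR, this]
      by_cases hmv : V ∈ v
      · -- duplicate value: both sides keep everything as is (A appends, dedup removes it)
        have hcv : PySem.Set.contains (PySem.Set.ofList v) V = true := by
          simpa [pysem] using hmv
        rw [if_pos hcv]
        refine ⟨?_, ?_, ?_, ?_⟩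
        · rw [hmod, PySem.Dict.keys_insert_of_contains _ _ hc]; exact hnd
        · rw [hmod, hdg, PySem.Dict.items_insert_of_contains _ _ hc, List.map_map, hout]
          apply List.map_congr_left
          intro p hp
          simp only [Function.comp]
          by_cases hpR : p.1 = R
          · have hpv := hentry p hp hpR
            rw [hpv]
            simp only [beq_self_eq_true, if_pos]
            rw [PySem.Set.ofList_append_singleton]
            simp [PySem.Set.add, hmv]
          · rw [if_neg (by simp [hpR])]
        · rw [hmod, hdg, PySem.Dict.items_insert_of_contains _ _ hc, List.map_map, hseen]
          apply List.map_congr_left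
          intro p hp
          simp only [Function.comp]
          by_cases hpR : p.1 = R
          · have hpv := hentry p hp hpR
            rw [hpv]
            simp only [beq_self_eq_true, if_pos]
            rw [PySem.Set.ofList_append_singleton]
            simp [PySem.Set.add, hmv]
          · rw [if_neg (by simp [hpR])]
        · rw [hmod, hdg, PySem.Dict.items_insert_of_contains _ _ hc]
          intro p hp x hx
          obtain ⟨q, hq, hqp⟩ := List.mem_map.mp hp
          by_cases hqR : q.1 = R
          · rw [if_pos (by simp [hqR])] at hqp
            rw [← hqp] at hx
            simp only at hx
            rcases List.mem_append.mp hx with h1 | h1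
            · exact hvals (R, v) hmem x h1
            · rw [List.mem_singleton.mp h1]; exact ⟨hVe, hVfix⟩
          · rw [if_neg (by simp [hqR])] at hqp
            rw [← hqp] at hx
            exact hvals q hq x hx
      · -- new value for an existing role: both sides append it at the role's entry
        have hcv : PySem.Set.contains (PySem.Set.ofList v) V = false := by
          simpa [pysem] using hmv
        rw [if_neg (by simpa [pysem] using hmv)]
        have haddv : PySem.Set.add (PySem.Set.ofList v) V = (PySem.Set.ofList v : List String) ++ [V] := by
          simp [PySem.Set.add, hmv]
        have hofl : PySem.Set.ofList (v ++ [V]) = (PySem.Set.ofList v : List String) ++ [V] := by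
          rw [PySem.Set.ofList_append_singleton, haddv]
        have hmodo : out.modify R [] (· ++ [V])
            = out.insert R ((PySem.Set.ofList v : List String) ++ [V]) := by
          show out.insert R (out.getD R [] ++ [V]) = _
          rw [hOg]
        refine ⟨?_, ?_, ?_, ?_⟩
        · rw [hmod, PySem.Dict.keys_insert_of_contains _ _ hc]; exact hnd
        · show (out.modify R [] (· ++ [V])).items = _
          rw [hmodo, hmod, hdg,
            PySem.Dict.items_insert_of_contains _ _ ((hco R).trans hc),
            PySem.Dict.items_insert_of_contains _ _ hc,
            List.map_map, hout, List.map_map]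
          apply List.map_congr_left
          intro p hp
          simp only [Function.comp]
          by_cases hpR : p.1 = R
          · rw [if_pos (by simp [hpR]), if_pos (by simp [hpR]), hofl]
          · rw [if_neg (by simp [hpR]), if_neg (by simp [hpR])]
        · show (seen.insert R (PySem.Set.add (PySem.Set.ofList v) V)).items = _
          rw [haddv, hmod, hdg,
            PySem.Dict.items_insert_of_contains _ _ ((hcs R).trans hc),
            PySem.Dict.items_insert_of_contains _ _ hc,
            List.map_map, hseen, List.map_map]
          apply List.map_congr_left
          intro p hp
          simp only [Function.comp]
          by_cases hpR : p.1 = R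
          · rw [if_pos (by simp [hpR]), if_pos (by simp [hpR]), hofl]
          · rw [if_neg (by simp [hpR]), if_neg (by simp [hpR])]
        · rw [hmod, hdg, PySem.Dict.items_insert_of_contains _ _ hc]
          intro p hp x hx
          obtain ⟨q, hq, hqp⟩ := List.mem_map.mp hp
          by_cases hqR : q.1 = R
          · rw [if_pos (by simp [hqR])] at hqp
            rw [← hqp] at hx
            simp only at hx
            rcases List.mem_append.mp hx with h1 | h1
            · exact hvals (R, v) hmem x h1
            · rw [List.mem_singleton.mp h1]; exact ⟨hVe, hVfix⟩
          · rw [if_neg (by simp [hqR])] at hqp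
            rw [← hqp] at hx
            exact hvals q hq x hx
    · -- fresh role: all three dicts append a new entry
      have hc' : d.contains R = false := by simpa using hc
      have hnotin : R ∉ d.keys := by
        intro hm
        have h2 := (PySem.Dict.contains_iff_mem_keys d R).mpr hm
        rw [hc'] at h2
        exact Bool.false_ne_true h2
      have hsd : seen.setdefault R PySem.Set.empty = seen.insert R PySem.Set.empty :=
        PySem.Dict.setdefault_of_not_contains _ _ ((hcs R).trans hc')
      have hg1 : (seen.insert R PySem.Set.empty).getD R PySem.Set.empty = PySem.Set.empty := by
        rw [PySem.Dict.getD_eq_get?_getD, PySem.Dict.get?_insert_self]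
        rfl
      rw [hsd, hg1]
      rw [if_neg (by simp [PySem.Set.contains, PySem.Set.empty])]
      have hdg : d.getD R [] = [] := PySem.Dict.getD_of_not_contains _ _ hc'
      have hOg : out.getD R [] = [] := PySem.Dict.getD_of_not_contains _ _ ((hco R).trans hc')
      have hmodo : out.modify R [] (· ++ [V]) = out.insert R [V] := by
        show out.insert R (out.getD R [] ++ [V]) = _
        rw [hOg]; rfl
      have haddv : PySem.Set.add PySem.Set.empty V = ([V] : List String) := rfl
      refine ⟨?_, ?_, ?_, ?_⟩
      · rw [hmod, hdg, PySem.Dict.keys_insert_of_not_contains _ _ hc']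
        exact List.Nodup.append hnd (List.nodup_singleton R)
          (fun a ha hb => hnotin ((List.mem_singleton.mp hb) ▸ ha))
      · show (out.modify R [] (· ++ [V])).items = _
        rw [hmodo, hmod, hdg,
          PySem.Dict.items_insert_of_not_contains _ _ ((hco R).trans hc'),
          PySem.Dict.items_insert_of_not_contains _ _ hc',
          List.map_append, hout]
        rfl
      · show ((seen.insert R PySem.Set.empty).insert R (PySem.Set.add PySem.Set.empty V)).items = _
        rw [PySem.Dict.insert_insert_self, haddv, hmod, hdg,
          PySem.Dict.items_insert_of_not_contains _ _ ((hcs R).trans hc'),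
          PySem.Dict.items_insert_of_not_contains _ _ hc',
          List.map_append, hseen]
        rfl
      · rw [hmod, hdg, PySem.Dict.items_insert_of_not_contains _ _ hc']
        intro p hp x hx
        rcases List.mem_append.mp hp with h1 | h1
        · exact hvals p h1 x hx
        · rw [List.mem_singleton.mp h1] at hx
          simp only [List.nil_append, List.mem_singleton] at hx
          rw [hx]; exact ⟨hVe, hVfix⟩

theorem pv_inv_empty : pvInv PySem.Dict.empty PySem.Dict.empty PySem.Dict.empty := by
  refine ⟨?_, rfl, rfl, ?_⟩
  · exact List.nodup_nil
  · intro p hp; cases hp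

theorem pv_fold_inv (args : List (List (String × Option String)))
    (d : PySem.Dict String (List String)) (out : PySem.Dict String (List String))
    (seen : PySem.Dict String (PySem.Set String)) (h : pvInv d out seen) :
    pvInv (args.foldl pvStepA d) (args.foldl pvStepB (out, seen)).1
      (args.foldl pvStepB (out, seen)).2 := by
  induction args generalizing d out seen with
  | nil => exact h
  | cons a t ih =>
    simp only [List.foldl_cons]
    have hstep := pv_inv_step d out seen a h
    have hps : pvStepB (out, seen) a = ((pvStepB (out, seen) a).1, (pvStepB (out, seen) a).2) := rfl
    rw [hps]
    exact ih _ _ _ hstep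

-- ===== VERDICT (by name: the statement is the Claim_ definition above) =====
theorem split_role_map_spec : Claim_equal_split_role_map := by
  intro args _hdom
  show split_role_map args = split_role_map_alt args
  unfold split_role_map split_role_map_alt
  obtain ⟨hnd, hout, hseen, hvals⟩ :=
    pv_fold_inv args PySem.Dict.empty PySem.Dict.empty PySem.Dict.empty pv_inv_empty
  rw [hout]
  apply List.map_congr_left
  intro p hp
  rw [pv_unique_eq_ofList p.2 (fun x hx => hvals p hp x hx)]
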